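-- pv_equiv track=rewrite | github.com/JKRhb/sdf-wot-converter-py | sdf_wot_converter/converters/tm_to_sdf.py | convert_pointer
-- ===== SOURCE A (Python) =====
-- def convert_pointer(pointer: str, current_path: str) -> str:
--     replacements = {
--         "events": "sdfEvent",
--         "actions": "sdfAction",
--         "properties": "sdfProperty",
--         "schemaDefinitions": "sdfData",
--         "input": "sdfInputData",
--         "output": "sdfOutputData",
--     }
--     for wot_string, sdf_string in replacements.items():
--         pointer = pointer.replace(wot_string, sdf_string)
--
--     return current_path + pointer[1:]
-- ===== SOURCE B (Python) =====
-- KEYS = [("events","sdfEvent"),("actions","sdfAction"),("properties","sdfProperty"),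
--         ("schemaDefinitions","sdfData"),("input","sdfInputData"),("output","sdfOutputData")]
--
-- def convert_pointer(pointer: str, current_path: str) -> str:
--     out = []
--     i = 0
--     n = len(pointer)
--     while i < n:
--         for wot_string, sdf_string in KEYS:
--             if pointer.startswith(wot_string, i):
--                 out.append(sdf_string)
--                 i += len(wot_string)
--                 break
--         else:
--             out.append(pointer[i])
--             i += 1
--     return current_path + "".join(out)[1:]
-- ===== Notes on version B (the rewrite author's own statement) =====
-- stated objective: alternative
-- what changed: Replaces six sequential full-string .replace passes by one single left-to-right scan that tries the six WoT keywords at each position and emits the replacement immediately, so replacement text is never rescanned by later passes; Pre_ excludes pointers containing one of six compounding substrings, on which the two multi-keyword replacement conventions legitimately disagree.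
-- outside the precondition, e.g. on convert_pointer('/actionevents', '#'): A returns '#sdfActiondfEvent', B returns '#actionsdfEvent'; on convert_pointer('/propertieactions', '#'): A returns '#sdfPropertydfAction', B returns '#propertiesdfAction'
import Mathlib
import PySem

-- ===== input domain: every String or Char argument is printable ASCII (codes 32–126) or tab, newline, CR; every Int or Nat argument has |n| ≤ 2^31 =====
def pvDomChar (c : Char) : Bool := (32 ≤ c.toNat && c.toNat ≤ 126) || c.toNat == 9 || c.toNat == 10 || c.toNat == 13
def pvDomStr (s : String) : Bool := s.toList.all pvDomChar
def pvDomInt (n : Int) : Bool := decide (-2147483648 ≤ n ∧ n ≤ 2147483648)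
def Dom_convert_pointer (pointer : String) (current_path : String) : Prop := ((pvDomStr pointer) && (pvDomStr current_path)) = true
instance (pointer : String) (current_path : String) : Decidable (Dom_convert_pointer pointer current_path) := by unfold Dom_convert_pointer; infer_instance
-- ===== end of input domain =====

-- B replaces A's six sequential .replace passes by one left-to-right scan over the pointer
-- (alternative decomposition, same cost); Pre_ excludes rare "compounding" pointers on which
-- the two multi-keyword replacement conventions legitimately disagree.


-- ===== PORT A =====
-- literal transliteration: six sequential str.replace passes, then current_path + pointer[1:]
def convert_pointer (pointer : String) (current_path : String) : String :=
  let p1 := PySem.Str.replace pointer "events" "sdfEvent"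
  let p2 := PySem.Str.replace p1 "actions" "sdfAction"
  let p3 := PySem.Str.replace p2 "properties" "sdfProperty"
  let p4 := PySem.Str.replace p3 "schemaDefinitions" "sdfData"
  let p5 := PySem.Str.replace p4 "input" "sdfInputData"
  let p6 := PySem.Str.replace p5 "output" "sdfOutputData"
  current_path ++ PySem.Str.slice p6 (some 1) none

-- ===== PORT B =====
-- the (keyword, replacement) table, in the order Source B tries them
def pvTable : List (List Char × List Char) :=
  [("events".toList, "sdfEvent".toList),
   ("actions".toList, "sdfAction".toList),
   ("properties".toList, "sdfProperty".toList),
   ("schemaDefinitions".toList, "sdfData".toList),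
   ("input".toList, "sdfInputData".toList),
   ("output".toList, "sdfOutputData".toList)]

-- Source B's single while-loop: at each position try the keywords in table order;
-- on a match emit the replacement and jump past the keyword, else copy one char.
-- (fuel = remaining loop bound, n - i in Source B; the loop advances ≥ 1 char per iteration)
def pvScan (ps : List (List Char × List Char)) : Nat → List Char → List Char
  | _, [] => []
  | 0, _ :: _ => []
  | fuel + 1, c :: t =>
    match ps.find? (fun pr => pr.1.isPrefixOf (c :: t)) with
    | some (k, r) => r ++ pvScan ps fuel (List.drop (k.length - 1) t)
    | none => c :: pvScan ps fuel t

def convert_pointer_alt (pointer : String) (current_path : String) : String :=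
  let replaced := String.ofList (pvScan pvTable pointer.toList.length pointer.toList)
  current_path ++ PySem.Str.slice replaced (some 1) none

-- ===== PRECONDITION & SPEC =====
-- Pre_ excludes pointers containing one of these six rare compounding substrings: there an
-- earlier pass of A inserts replacement text whose leading 's' completes a later keyword, so
-- A's sequential-pass convention and B's one-pass convention give different results and
-- neither multi-keyword replacement value is canonical (no real WoT pointer contains them).
def pvPatterns : List String :=
  ["actionevents", "propertieevents", "propertieactions",
   "schemaDefinitionevents", "schemaDefinitionactions", "schemaDefinitionproperties"]

def Pre_convert_pointer (pointer : String) (current_path : String) : Prop :=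
  (pvPatterns.any (fun p => PySem.Str.isIn p pointer)) = false
instance (pointer : String) (current_path : String) : Decidable (Pre_convert_pointer pointer current_path) := by
  unfold Pre_convert_pointer; infer_instance

def pvWitness_convert_pointer : String × String := ("#/properties/temperature", "#")

def Spec_convert_pointer (pointer : String) (current_path : String) (out : String) : Prop :=
  out = convert_pointer_alt pointer current_path
instance (pointer : String) (current_path : String) (out : String) : Decidable (Spec_convert_pointer pointer current_path out) := by
  unfold Spec_convert_pointer; infer_instance

-- ===== CLAIM (what is proved, stated in full; the proofs are below) =====
def Claim_equal_convert_pointer : Prop := ∀ (pointer : String) (current_path : String), Dom_convert_pointer pointer current_path → Pre_convert_pointer pointer current_path → Spec_convert_pointer pointer current_path (convert_pointer pointer current_path)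

-- ===== LEMMAS AND PROOFS =====

-- A's str.replace, re-expressed as a well-founded recursion (used only by the proofs)
def pvRep (k r : List Char) : List Char → List Char
  | [] => []
  | c :: t =>
    if k.isPrefixOf (c :: t) then r ++ pvRep k r (List.drop (k.length - 1) t)
    else c :: pvRep k r t
termination_by s => s.length
decreasing_by
  all_goals simp [List.length_drop]
  all_goals omega

-- basic equations ---------------------------------------------------------

lemma pvDropPredCons (k : List Char) (hk : k ≠ []) (c : Char) (t : List Char) :
    List.drop (k.length - 1) t = List.drop k.length (c :: t) := by
  cases k with
  | nil => exact absurd rfl hk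
  | cons a k' => simp

lemma pvRep_nil (k r : List Char) : pvRep k r [] = [] := by simp [pvRep]

lemma pvRep_cons_pos (k r : List Char) (c : Char) (t : List Char) (h : k <+: (c :: t)) :
    pvRep k r (c :: t) = r ++ pvRep k r (List.drop (k.length - 1) t) := by
  rw [pvRep, if_pos (List.isPrefixOf_iff_prefix.2 h)]

lemma pvRep_cons_neg (k r : List Char) (c : Char) (t : List Char) (h : ¬ k <+: (c :: t)) :
    pvRep k r (c :: t) = c :: pvRep k r t := by
  rw [pvRep, if_neg (fun hb => h (List.isPrefixOf_iff_prefix.1 hb))]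

lemma pvGoSpec (k r : List Char) (hk : k ≠ []) :
    ∀ fuel (l acc : List Char), l.length ≤ fuel →
      PySem.Chars.replace.go k r fuel l acc = acc.reverse ++ pvRep k r l := by
  intro fuel
  induction fuel with
  | zero =>
    intro l acc hl
    have : l = [] := List.length_eq_zero_iff.1 (Nat.le_zero.1 hl)
    subst this
    simp [PySem.Chars.replace.go, pvRep_nil]
  | succ n ih =>
    intro l acc hl
    cases l with
    | nil => simp [PySem.Chars.replace.go, pvRep_nil]
    | cons c t =>
      by_cases hpre : k <+: (c :: t)
      · rw [PySem.Chars.replace.go]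
        simp only [List.isPrefixOf_iff_prefix.2 hpre, if_true]
        have hk1 : 0 < k.length := List.length_pos_iff.2 hk
        have hl' : t.length + 1 ≤ n + 1 := by simpa using hl
        rw [ih (List.drop k.length (c :: t)) (r.reverse ++ acc)
          (by simp only [List.length_drop, List.length_cons]; omega)]
        rw [pvRep_cons_pos k r c t hpre, pvDropPredCons k hk c t]
        simp
      · rw [PySem.Chars.replace.go]
        simp only [(by
          rw [Bool.eq_false_iff]
          intro hb
          exact hpre (List.isPrefixOf_iff_prefix.1 hb) : k.isPrefixOf (c :: t) = false), if_false]
        have hl' : t.length + 1 ≤ n + 1 := by simpa using hl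
        rw [ih t (c :: acc) (by omega)]
        rw [pvRep_cons_neg k r c t hpre]
        simp

lemma pvReplace_eq_pvRep (k r s : List Char) (hk : k ≠ []) :
    PySem.Chars.replace s k r = pvRep k r s := by
  unfold PySem.Chars.replace
  rw [if_neg (by simp [List.isEmpty_iff, hk])]
  rw [pvGoSpec k r hk s.length s [] (le_refl _)]
  simp

-- pvScan, re-expressed without the fuel parameter (used only by the proofs)
def pvScanW (ps : List (List Char × List Char)) : List Char → List Char
  | [] => []
  | c :: t =>
    match ps.find? (fun pr => pr.1.isPrefixOf (c :: t)) with
    | some (k, r) => r ++ pvScanW ps (List.drop (k.length - 1) t)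
    | none => c :: pvScanW ps t
termination_by s => s.length
decreasing_by
  all_goals simp [List.length_drop]
  all_goals omega

lemma pvScanW_nil (ps : List (List Char × List Char)) : pvScanW ps [] = [] := by simp [pvScanW]

lemma pvScanW_cons_some (ps : List (List Char × List Char)) (c : Char) (t k r : List Char)
    (h : ps.find? (fun pr => pr.1.isPrefixOf (c :: t)) = some (k, r)) :
    pvScanW ps (c :: t) = r ++ pvScanW ps (List.drop (k.length - 1) t) := by
  rw [pvScanW, h]

lemma pvScanW_cons_none (ps : List (List Char × List Char)) (c : Char) (t : List Char)
    (h : ps.find? (fun pr => pr.1.isPrefixOf (c :: t)) = none) :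
    pvScanW ps (c :: t) = c :: pvScanW ps t := by
  rw [pvScanW, h]

lemma pvScanW_empty_table (s : List Char) : pvScanW [] s = s := by
  induction s with
  | nil => exact pvScanW_nil []
  | cons c t ih => rw [pvScanW_cons_none [] c t (by simp), ih]

lemma pvScan_eq_pvScanW (ps : List (List Char × List Char)) :
    ∀ fuel (s : List Char), s.length ≤ fuel → pvScan ps fuel s = pvScanW ps s := by
  intro fuel
  induction fuel with
  | zero =>
    intro s hs
    have hnil : s = [] := List.length_eq_zero_iff.1 (Nat.le_zero.1 hs)
    subst hnil
    rw [pvScanW_nil]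
    rfl
  | succ n ih =>
    intro s hs
    cases s with
    | nil => rw [pvScanW_nil]; rfl
    | cons c t =>
      cases hfind : ps.find? (fun pr => pr.1.isPrefixOf (c :: t)) with
      | none =>
        simp only [pvScan, hfind]
        rw [pvScanW_cons_none ps c t hfind, ih t (by simpa using hs)]
      | some pr0 =>
        obtain ⟨k, r⟩ := pr0
        simp only [pvScan, hfind]
        rw [pvScanW_cons_some ps c t k r hfind, ih (List.drop (k.length - 1) t)
          (by simp only [List.length_drop, List.length_cons] at hs ⊢; omega)]

-- infix / prefix toolbox ---------------------------------------------------

lemma pvInfix_iff_exists_drop (w z : List Char) : w <:+: z ↔ ∃ j, w <+: z.drop j := by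
  rw [← PySem.Chars.isIn_iff_infix, ← PySem.Chars.exists_prefix_drop_iff_isIn]

lemma pvPrefix_append_cases {w a b : List Char} (h : w <+: a ++ b) :
    w <+: a ∨ (a <+: w ∧ List.drop a.length w <+: b) := by
  rcases List.prefix_or_prefix_of_prefix h (List.prefix_append a b) with h1 | h1
  · exact Or.inl h1
  · right
    refine ⟨h1, ?_⟩
    obtain ⟨u, rfl⟩ := h1
    rw [List.drop_left]
    obtain ⟨v, hv⟩ := h
    rw [List.append_assoc] at hv
    exact ⟨v, List.append_cancel_left hv⟩

lemma pvPrefix_drop_infix {w z : List Char} (j : ℕ) (h : w <+: z.drop j) : w <:+: z :=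
  (pvInfix_iff_exists_drop w z).2 ⟨j, h⟩

-- the bad region ----------------------------------------------------------

def pvBadL (pats : List (List Char)) (s : List Char) : Prop := ∃ p ∈ pats, p <:+: s

lemma pvBadL_mono {pats : List (List Char)} {s' s : List Char} (h : s' <:+: s) :
    pvBadL pats s' → pvBadL pats s := fun ⟨p, hp, hi⟩ => ⟨p, hp, hi.trans h⟩

-- occurrence reflection through one replace pass ---------------------------

lemma pvRep_prefix_refl (k r : List Char) (hk : k ≠ []) :
    ∀ n (s w : List Char), s.length ≤ n → w ≠ [] → w <+: pvRep k r s →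
      w <+: s ∨ ∃ q, q < w.length ∧ (w.take q ++ k) <+: s ∧
        (List.drop q w <+: r ∨ r <+: List.drop q w) := by
  intro n
  induction n with
  | zero =>
    intro s w hs hw hpre
    have hnil : s = [] := List.length_eq_zero_iff.1 (Nat.le_zero.1 hs)
    subst hnil
    rw [pvRep_nil] at hpre
    exact absurd (List.prefix_nil.1 hpre) hw
  | succ n ih =>
    intro s w hs hw hpre
    cases s with
    | nil =>
      rw [pvRep_nil] at hpre
      exact absurd (List.prefix_nil.1 hpre) hw
    | cons c t =>
      by_cases hkp : k <+: (c :: t)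
      · rw [pvRep_cons_pos k r c t hkp] at hpre
        rcases pvPrefix_append_cases hpre with h1 | ⟨h1, _⟩
        · exact Or.inr ⟨0, List.length_pos_iff.2 hw, by simpa using hkp, Or.inl (by simpa using h1)⟩
        · exact Or.inr ⟨0, List.length_pos_iff.2 hw, by simpa using hkp, Or.inr (by simpa using h1)⟩
      · rw [pvRep_cons_neg k r c t hkp] at hpre
        cases w with
        | nil => exact absurd rfl hw
        | cons d w' =>
          rw [List.cons_prefix_cons] at hpre
          obtain ⟨rfl, hw'⟩ := hpre
          by_cases hw0 : w' = []
          · subst hw0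
            exact Or.inl (by simp)
          · have hlt : t.length ≤ n := by simpa using hs
            rcases ih t w' hlt hw0 hw' with h1 | ⟨q, hq, hocc, hdisj⟩
            · exact Or.inl (List.cons_prefix_cons.2 ⟨rfl, h1⟩)
            · refine Or.inr ⟨q + 1, by simpa using Nat.succ_lt_succ hq, ?_, ?_⟩
              · rw [List.take_succ_cons, List.cons_append]
                exact List.cons_prefix_cons.2 ⟨rfl, hocc⟩
              · simpa using hdisj

lemma pvRep_infix_refl (k r : List Char) (hk : k ≠ []) :
    ∀ n (s w : List Char), s.length ≤ n → w ≠ [] → w <:+: pvRep k r s →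
      w <:+: s
      ∨ (∃ q, q < w.length ∧ (w.take q ++ k) <:+: s ∧
          (List.drop q w <+: r ∨ r <+: List.drop q w))
      ∨ w <:+: r
      ∨ (∃ m, 0 < m ∧ m < r.length ∧ r.drop m <+: w) := by
  intro n
  induction n with
  | zero =>
    intro s w hs hw hinf
    have hnil : s = [] := List.length_eq_zero_iff.1 (Nat.le_zero.1 hs)
    subst hnil
    rw [pvRep_nil] at hinf
    exact absurd (List.infix_nil.1 hinf) hw
  | succ n ih =>
    intro s w hs hw hinf
    cases s with
    | nil =>
      rw [pvRep_nil] at hinf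
      exact absurd (List.infix_nil.1 hinf) hw
    | cons c t =>
      by_cases hkp : k <+: (c :: t)
      · rw [pvRep_cons_pos k r c t hkp] at hinf
        obtain ⟨j, hj⟩ := (pvInfix_iff_exists_drop _ _).1 hinf
        by_cases hjr : j < r.length
        · rw [List.drop_append, Nat.sub_eq_zero_of_le (Nat.le_of_lt hjr), List.drop_zero] at hj
          rcases pvPrefix_append_cases hj with h1 | ⟨h1, _⟩
          · exact Or.inr (Or.inr (Or.inl (pvPrefix_drop_infix j h1)))
          · by_cases hj0 : j = 0
            · subst hj0
              refine Or.inr (Or.inl ⟨0, List.length_pos_iff.2 hw, by simpa using hkp.isInfix, Or.inr (by simpa using h1)⟩)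
            · exact Or.inr (Or.inr (Or.inr ⟨j, Nat.pos_of_ne_zero hj0, hjr, h1⟩))
        · rw [List.drop_append, List.drop_eq_nil_of_le (by omega)] at hj
          have hinfZ : w <:+: pvRep k r (List.drop (k.length - 1) t) :=
            pvPrefix_drop_infix _ (by simpa using hj)
          have hlt : (List.drop (k.length - 1) t).length ≤ n := by
            simp only [List.length_drop, List.length_cons] at hs ⊢
            omega
          have hsuf : List.drop (k.length - 1) t <:+: (c :: t) :=
            ((List.drop_suffix _ t).trans (List.suffix_cons c t)).isInfix
          rcases ih _ w hlt hw hinfZ with h1 | ⟨q, hq, hocc, hd⟩ | h1 | h1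
          · exact Or.inl (h1.trans hsuf)
          · exact Or.inr (Or.inl ⟨q, hq, hocc.trans hsuf, hd⟩)
          · exact Or.inr (Or.inr (Or.inl h1))
          · exact Or.inr (Or.inr (Or.inr h1))
      · rw [pvRep_cons_neg k r c t hkp] at hinf
        obtain ⟨j, hj⟩ := (pvInfix_iff_exists_drop _ _).1 hinf
        cases j with
        | zero =>
          rw [List.drop_zero, ← pvRep_cons_neg k r c t hkp] at hj
          rcases pvRep_prefix_refl k r hk (n + 1) (c :: t) w hs hw hj with h1 | ⟨q, hq, hocc, hd⟩
          · exact Or.inl h1.isInfix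
          · exact Or.inr (Or.inl ⟨q, hq, hocc.isInfix, hd⟩)
        | succ j' =>
          have hinfT : w <:+: pvRep k r t := pvPrefix_drop_infix j' (by simpa using hj)
          have hlt : t.length ≤ n := by simpa using hs
          have hsuf : t <:+: (c :: t) := (List.suffix_cons c t).isInfix
          rcases ih t w hlt hw hinfT with h1 | ⟨q, hq, hocc, hd⟩ | h1 | h1
          · exact Or.inl (h1.trans hsuf)
          · exact Or.inr (Or.inl ⟨q, hq, hocc.trans hsuf, hd⟩)
          · exact Or.inr (Or.inr (Or.inl h1))
          · exact Or.inr (Or.inr (Or.inr h1))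

-- splitting lemmas ---------------------------------------------------------

lemma pvRep_append (k r : List Char) :
    ∀ (a b : List Char), (∀ m, m < a.length → ¬ k <+: List.drop m (a ++ b)) →
      pvRep k r (a ++ b) = a ++ pvRep k r b := by
  intro a
  induction a with
  | nil => intro b _; simp
  | cons c a' ih =>
    intro b H
    rw [List.cons_append, pvRep_cons_neg k r c (a' ++ b) (by
      have := H 0 (by simp)
      simpa using this)]
    rw [ih b (fun m hm => by
      have := H (m + 1) (by simp; omega)
      simpa using this)]
    rfl

lemma pvScanW_append (ps : List (List Char × List Char)) :
    ∀ (a b : List Char), (∀ m, m < a.length → ∀ pr ∈ ps, ¬ pr.1 <+: List.drop m (a ++ b)) →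
      pvScanW ps (a ++ b) = a ++ pvScanW ps b := by
  intro a
  induction a with
  | nil => intro b _; simp
  | cons c a' ih =>
    intro b H
    rw [List.cons_append, pvScanW_cons_none ps c (a' ++ b) (List.find?_eq_none.2 (by
      intro pr hpr
      simp only [Bool.not_eq_true, ← Bool.not_eq_true, List.isPrefixOf_iff_prefix]
      have := H 0 (by simp) pr hpr
      simpa using this))]
    rw [ih b (fun m hm pr hpr => by
      have := H (m + 1) (by simp; omega) pr hpr
      simpa using this)]
    rfl

lemma pvFind_cons_pos (ps : List (List Char × List Char)) (pr0 : List Char × List Char)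
    (s : List Char) (h : pr0.1.isPrefixOf s = true) :
    (pr0 :: ps).find? (fun pr => pr.1.isPrefixOf s) = some pr0 :=
  List.find?_cons_of_pos h

lemma pvFind_cons_neg (ps : List (List Char × List Char)) (pr0 : List Char × List Char)
    (s : List Char) (h : pr0.1.isPrefixOf s = false) :
    (pr0 :: ps).find? (fun pr => pr.1.isPrefixOf s) = ps.find? (fun pr => pr.1.isPrefixOf s) :=
  List.find?_cons_of_neg (by simp [h])

lemma pvFind_stable (Z : List Char) :
    ∀ (ps : List (List Char × List Char)) (s kj rj : List Char),
      List.Pairwise (fun a b => ¬ a.1 <+: b.1 ∧ ¬ b.1 <+: a.1) ps →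
      ps.find? (fun pr => pr.1.isPrefixOf s) = some (kj, rj) →
      kj <+: s →
      ps.find? (fun pr => pr.1.isPrefixOf (kj ++ Z)) = some (kj, rj) := by
  intro ps
  induction ps with
  | nil => intro s kj rj _ h _; simp at h
  | cons p ps' ih =>
    intro s kj rj hpair h hkjs
    cases hp : p.1.isPrefixOf s with
    | true =>
      rw [pvFind_cons_pos ps' p s hp] at h
      obtain rfl : p = (kj, rj) := by injection h
      exact pvFind_cons_pos ps' (kj, rj) (kj ++ Z)
        (List.isPrefixOf_iff_prefix.2 (List.prefix_append kj Z))
    | false =>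
      rw [pvFind_cons_neg ps' p s hp] at h
      have hmem := List.mem_of_find?_eq_some h
      have hnp : p.1.isPrefixOf (kj ++ Z) = false := by
        rw [← Bool.not_eq_true]
        intro hb
        rcases pvPrefix_append_cases (List.isPrefixOf_iff_prefix.1 hb) with h1 | ⟨h1, _⟩
        · exact absurd (List.isPrefixOf_iff_prefix.2 (h1.trans hkjs)) (by simp [hp])
        · exact ((List.pairwise_cons.1 hpair).1 (kj, rj) hmem).2 h1
      rw [pvFind_cons_neg ps' p (kj ++ Z) hnp]
      exact ih s kj rj (List.pairwise_cons.1 hpair).2 h hkjs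

-- the one-stage theorem ----------------------------------------------------

lemma pvStage_bad (k r : List Char) (pats pats' : List (List Char))
    (hk : k ≠ [])
    (hsub : ∀ p ∈ pats', p ∈ pats)
    (hpats' : ∀ p ∈ pats', p ≠ [])
    (hPatR : ∀ p ∈ pats', ¬ p <:+: r)
    (hRinPat : ∀ p ∈ pats', ¬ r <:+: p)
    (hRdropPat : ∀ p ∈ pats', ∀ m, m < r.length → 0 < m → ¬ r.drop m <+: p)
    (hPatEscape : ∀ p ∈ pats', ∀ q, q < p.length → 0 < q → List.drop q p <+: r →
        ∃ p0 ∈ pats, p0 <:+: (p.take q ++ k)) :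
    ∀ s, ¬ pvBadL pats s → ¬ pvBadL pats' (pvRep k r s) := by
  intro s hbad ⟨p, hp, hinf⟩
  rcases pvRep_infix_refl k r hk s.length s p le_rfl (hpats' p hp) hinf with
    h1 | ⟨q, hq, hocc, hd⟩ | h1 | ⟨m, hm0, hmlt, hmp⟩
  · exact hbad ⟨p, hsub p hp, h1⟩
  · rcases hd with h2 | h2
    · by_cases hq0 : q = 0
      · subst hq0
        exact hPatR p hp ((by simpa using h2 : p <+: r).isInfix)
      · obtain ⟨p0, hp0, hinf0⟩ := hPatEscape p hp q hq (Nat.pos_of_ne_zero hq0) h2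
        exact hbad ⟨p0, hp0, hinf0.trans hocc⟩
    · exact hRinPat p hp (pvPrefix_drop_infix q h2)
  · exact hPatR p hp h1
  · exact hRdropPat p hp m hmlt hm0 hmp

lemma pvStage_scan (k r : List Char) (ps : List (List Char × List Char)) (pats : List (List Char))
    (hk : k ≠ [])
    (hps : ∀ pr ∈ ps, pr.1 ≠ [])
    (hpair : List.Pairwise (fun a b => ¬ a.1 <+: b.1 ∧ ¬ b.1 <+: a.1) ps)
    (hkeyR : ∀ pr ∈ ps, ¬ pr.1 <:+: r)
    (hRdropKey : ∀ pr ∈ ps, ∀ m, m < r.length → ¬ List.drop m r <+: pr.1)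
    (hKinKey : ∀ pr ∈ ps, ¬ k <:+: pr.1)
    (hKeyDropK : ∀ pr ∈ ps, ∀ m, m < pr.1.length → 0 < m → ¬ List.drop m pr.1 <+: k)
    (hRinKey : ∀ pr ∈ ps, ¬ r <:+: pr.1)
    (hEscape : ∀ pr ∈ ps, ∀ q, q < pr.1.length → 0 < q → List.drop q pr.1 <+: r →
        (pr.1.take q ++ k) ∈ pats) :
    ∀ n (s : List Char), s.length ≤ n → ¬ pvBadL pats s →
      pvScanW ps (pvRep k r s) = pvScanW ((k, r) :: ps) s := by
  intro n
  induction n with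
  | zero =>
    intro s hs _
    have hnil : s = [] := List.length_eq_zero_iff.1 (Nat.le_zero.1 hs)
    subst hnil
    rw [pvRep_nil, pvScanW_nil, pvScanW_nil]
  | succ n ih =>
    intro s hs hbad
    cases s with
    | nil => rw [pvRep_nil, pvScanW_nil, pvScanW_nil]
    | cons c t =>
      by_cases hkp : k <+: (c :: t)
      · rw [pvRep_cons_pos k r c t hkp]
        rw [pvScanW_append ps r (pvRep k r (List.drop (k.length - 1) t)) (by
          intro m hm pr hpr hcon
          rw [List.drop_append, Nat.sub_eq_zero_of_le (Nat.le_of_lt hm), List.drop_zero] at hcon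
          rcases pvPrefix_append_cases hcon with h1 | ⟨h1, _⟩
          · exact hkeyR pr hpr (pvPrefix_drop_infix m h1)
          · exact hRdropKey pr hpr m hm h1)]
        rw [pvScanW_cons_some ((k, r) :: ps) c t k r
          (pvFind_cons_pos ps (k, r) (c :: t) (List.isPrefixOf_iff_prefix.2 hkp))]
        congr 1
        refine ih (List.drop (k.length - 1) t) (by
          simp only [List.length_drop, List.length_cons] at hs ⊢
          omega) (fun hb' => hbad (pvBadL_mono
            ((List.drop_suffix _ t).trans (List.suffix_cons c t)).isInfix hb'))
      · have hkpb : k.isPrefixOf (c :: t) = false := by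
          rw [← Bool.not_eq_true]
          exact fun hb => hkp (List.isPrefixOf_iff_prefix.1 hb)
        cases hfind : ps.find? (fun pr => pr.1.isPrefixOf (c :: t)) with
        | none =>
          rw [pvScanW_cons_none ((k, r) :: ps) c t (by rw [pvFind_cons_neg ps (k, r) (c :: t) hkpb, hfind])]
          rw [pvRep_cons_neg k r c t hkp]
          rw [pvScanW_cons_none ps c (pvRep k r t) (List.find?_eq_none.2 (by
            intro pr hpr hbp
            have hpre : pr.1 <+: pvRep k r (c :: t) := by
              rw [pvRep_cons_neg k r c t hkp]
              exact List.isPrefixOf_iff_prefix.1 hbp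
            rcases pvRep_prefix_refl k r hk (c :: t).length (c :: t) pr.1 le_rfl (hps pr hpr) hpre with
              h1 | ⟨q, hq, hocc, hd⟩
            · exact (List.find?_eq_none.1 hfind pr hpr) (List.isPrefixOf_iff_prefix.2 h1)
            · rcases hd with h2 | h2
              · by_cases hq0 : q = 0
                · subst hq0
                  exact hkeyR pr hpr ((by simpa using h2 : pr.1 <+: r).isInfix)
                · exact hbad ⟨pr.1.take q ++ k,
                    hEscape pr hpr q hq (Nat.pos_of_ne_zero hq0) h2, hocc.isInfix⟩
              · exact hRinKey pr hpr (pvPrefix_drop_infix q h2)))]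
          congr 1
          exact ih t (by simpa using hs)
            (fun hb' => hbad (pvBadL_mono (List.suffix_cons c t).isInfix hb'))
        | some pr0 =>
          obtain ⟨kj, rj⟩ := pr0
          have hkjs : kj <+: (c :: t) := List.isPrefixOf_iff_prefix.1
            (by simpa using List.find?_some hfind)
          have hmem : (kj, rj) ∈ ps := List.mem_of_find?_eq_some hfind
          have hkjne : kj ≠ [] := hps _ hmem
          obtain ⟨b, hbapp⟩ := hkjs
          have hrep : pvRep k r (c :: t) = kj ++ pvRep k r b := by
            rw [← hbapp]
            apply pvRep_append
            intro m hm hcon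
            by_cases hm0 : m = 0
            · subst hm0
              rw [List.drop_zero, hbapp] at hcon
              exact hkp hcon
            · rw [List.drop_append, Nat.sub_eq_zero_of_le (Nat.le_of_lt hm), List.drop_zero] at hcon
              rcases pvPrefix_append_cases hcon with h1 | ⟨h1, _⟩
              · exact hKinKey _ hmem (pvPrefix_drop_infix m h1)
              · exact hKeyDropK _ hmem m hm (Nat.pos_of_ne_zero hm0) h1
          rw [hrep]
          have hfindZ := pvFind_stable (pvRep k r b) ps (c :: t) kj rj hpair hfind ⟨b, hbapp⟩
          have hbt : b = List.drop (kj.length - 1) t := by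
            have h1 := congrArg (List.drop kj.length) hbapp
            rw [List.drop_left] at h1
            rw [h1, pvDropPredCons kj hkjne c t]
          have hblen : b.length ≤ n := by
            have h1 := congrArg List.length hbapp
            have h2 : 0 < kj.length := List.length_pos_iff.2 hkjne
            simp only [List.length_append, List.length_cons] at h1 hs
            omega
          have hbbad : ¬ pvBadL pats b :=
            fun hb' => hbad (pvBadL_mono (List.IsSuffix.isInfix ⟨kj, hbapp⟩) hb')
          cases kj with
          | nil => exact absurd rfl hkjne
          | cons d kj' =>
            rw [List.cons_append, pvScanW_cons_some ps d (kj' ++ pvRep k r b) (d :: kj') rj hfindZ]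
            have hdrop : List.drop ((d :: kj').length - 1) (kj' ++ pvRep k r b) = pvRep k r b := by
              simp only [List.length_cons, Nat.add_sub_cancel]
              exact List.drop_left
            rw [hdrop]
            rw [pvScanW_cons_some ((k, r) :: ps) c t (d :: kj') rj
              (by rw [pvFind_cons_neg ps (k, r) (c :: t) hkpb]; exact hfind)]
            congr 1
            rw [show List.drop ((d :: kj').length - 1) t = b from hbt ▸ rfl]
            exact ih b hblen hbbad

-- the concrete pattern lists for the six stages ----------------------------

def pvPats1 : List (List Char) := pvPatterns.map String.toList
def pvPats2 : List (List Char) :=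
  ["propertieactions".toList, "schemaDefinitionactions".toList, "schemaDefinitionproperties".toList]
def pvPats3 : List (List Char) := ["schemaDefinitionproperties".toList]

-- chaining the six stages --------------------------------------------------

lemma pvChain (s : List Char) (hbad : ¬ pvBadL pvPats1 s) :
    pvRep "output".toList "sdfOutputData".toList
      (pvRep "input".toList "sdfInputData".toList
        (pvRep "schemaDefinitions".toList "sdfData".toList
          (pvRep "properties".toList "sdfProperty".toList
            (pvRep "actions".toList "sdfAction".toList
              (pvRep "events".toList "sdfEvent".toList s)))))
    = pvScanW pvTable s := by
  have hb0 : ¬ pvBadL pvPats1 s := hbad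
  have e1 := pvStage_scan "events".toList "sdfEvent".toList [("actions".toList, "sdfAction".toList), ("properties".toList, "sdfProperty".toList), ("schemaDefinitions".toList, "sdfData".toList), ("input".toList, "sdfInputData".toList), ("output".toList, "sdfOutputData".toList)] pvPats1
    (by decide) (by decide) (by decide) (by decide) (by decide) (by decide) (by decide)
    (by decide) (by decide) s.length s le_rfl hb0
  have hb1 := pvStage_bad "events".toList "sdfEvent".toList pvPats1 pvPats2
    (by decide) (by decide) (by decide) (by decide) (by decide) (by decide) (by decide)
    s hb0
  have e2 := pvStage_scan "actions".toList "sdfAction".toList [("properties".toList, "sdfProperty".toList), ("schemaDefinitions".toList, "sdfData".toList), ("input".toList, "sdfInputData".toList), ("output".toList, "sdfOutputData".toList)] pvPats2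
    (by decide) (by decide) (by decide) (by decide) (by decide) (by decide) (by decide)
    (by decide) (by decide) (pvRep "events".toList "sdfEvent".toList s).length (pvRep "events".toList "sdfEvent".toList s) le_rfl hb1
  have hb2 := pvStage_bad "actions".toList "sdfAction".toList pvPats2 pvPats3
    (by decide) (by decide) (by decide) (by decide) (by decide) (by decide) (by decide)
    (pvRep "events".toList "sdfEvent".toList s) hb1
  have e3 := pvStage_scan "properties".toList "sdfProperty".toList [("schemaDefinitions".toList, "sdfData".toList), ("input".toList, "sdfInputData".toList), ("output".toList, "sdfOutputData".toList)] pvPats3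
    (by decide) (by decide) (by decide) (by decide) (by decide) (by decide) (by decide)
    (by decide) (by decide) (pvRep "actions".toList "sdfAction".toList (pvRep "events".toList "sdfEvent".toList s)).length (pvRep "actions".toList "sdfAction".toList (pvRep "events".toList "sdfEvent".toList s)) le_rfl hb2
  have hb3 := pvStage_bad "properties".toList "sdfProperty".toList pvPats3 ([] : List (List Char))
    (by decide) (by decide) (by decide) (by decide) (by decide) (by decide) (by decide)
    (pvRep "actions".toList "sdfAction".toList (pvRep "events".toList "sdfEvent".toList s)) hb2
  have e4 := pvStage_scan "schemaDefinitions".toList "sdfData".toList [("input".toList, "sdfInputData".toList), ("output".toList, "sdfOutputData".toList)] ([] : List (List Char))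
    (by decide) (by decide) (by decide) (by decide) (by decide) (by decide) (by decide)
    (by decide) (by decide) (pvRep "properties".toList "sdfProperty".toList (pvRep "actions".toList "sdfAction".toList (pvRep "events".toList "sdfEvent".toList s))).length (pvRep "properties".toList "sdfProperty".toList (pvRep "actions".toList "sdfAction".toList (pvRep "events".toList "sdfEvent".toList s))) le_rfl hb3
  have hb4 := pvStage_bad "schemaDefinitions".toList "sdfData".toList ([] : List (List Char)) ([] : List (List Char))
    (by decide) (by decide) (by decide) (by decide) (by decide) (by decide) (by decide)
    (pvRep "properties".toList "sdfProperty".toList (pvRep "actions".toList "sdfAction".toList (pvRep "events".toList "sdfEvent".toList s))) hb3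
  have e5 := pvStage_scan "input".toList "sdfInputData".toList [("output".toList, "sdfOutputData".toList)] ([] : List (List Char))
    (by decide) (by decide) (by decide) (by decide) (by decide) (by decide) (by decide)
    (by decide) (by decide) (pvRep "schemaDefinitions".toList "sdfData".toList (pvRep "properties".toList "sdfProperty".toList (pvRep "actions".toList "sdfAction".toList (pvRep "events".toList "sdfEvent".toList s)))).length (pvRep "schemaDefinitions".toList "sdfData".toList (pvRep "properties".toList "sdfProperty".toList (pvRep "actions".toList "sdfAction".toList (pvRep "events".toList "sdfEvent".toList s)))) le_rfl hb4
  have hb5 := pvStage_bad "input".toList "sdfInputData".toList ([] : List (List Char)) ([] : List (List Char))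
    (by decide) (by decide) (by decide) (by decide) (by decide) (by decide) (by decide)
    (pvRep "schemaDefinitions".toList "sdfData".toList (pvRep "properties".toList "sdfProperty".toList (pvRep "actions".toList "sdfAction".toList (pvRep "events".toList "sdfEvent".toList s)))) hb4
  have e6 := pvStage_scan "output".toList "sdfOutputData".toList ([] : List (List Char × List Char)) ([] : List (List Char))
    (by decide) (by decide) (by decide) (by decide) (by decide) (by decide) (by decide)
    (by decide) (by decide) (pvRep "input".toList "sdfInputData".toList (pvRep "schemaDefinitions".toList "sdfData".toList (pvRep "properties".toList "sdfProperty".toList (pvRep "actions".toList "sdfAction".toList (pvRep "events".toList "sdfEvent".toList s))))).length (pvRep "input".toList "sdfInputData".toList (pvRep "schemaDefinitions".toList "sdfData".toList (pvRep "properties".toList "sdfProperty".toList (pvRep "actions".toList "sdfAction".toList (pvRep "events".toList "sdfEvent".toList s))))) le_rfl hb5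
  calc (pvRep "output".toList "sdfOutputData".toList (pvRep "input".toList "sdfInputData".toList (pvRep "schemaDefinitions".toList "sdfData".toList (pvRep "properties".toList "sdfProperty".toList (pvRep "actions".toList "sdfAction".toList (pvRep "events".toList "sdfEvent".toList s))))))
      = pvScanW ([] : List (List Char × List Char)) (pvRep "output".toList "sdfOutputData".toList (pvRep "input".toList "sdfInputData".toList (pvRep "schemaDefinitions".toList "sdfData".toList (pvRep "properties".toList "sdfProperty".toList (pvRep "actions".toList "sdfAction".toList (pvRep "events".toList "sdfEvent".toList s)))))) := (pvScanW_empty_table _).symm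
    _ = pvScanW pvTable s := by
        rw [e6, e5, e4, e3, e2]
        exact e1


lemma pvSliceCongr (cp : String) (x y : String) (h : x.toList = y.toList) :
    cp ++ PySem.Str.slice x (some 1) none = cp ++ PySem.Str.slice y (some 1) none := by
  unfold PySem.Str.slice
  rw [h]

-- ===== VERDICT (by name: the statement is the Claim_ definition above) =====
theorem convert_pointer_spec : Claim_equal_convert_pointer := by
  intro pointer current_path _hdom hpre
  have hbad : ¬ pvBadL pvPats1 pointer.toList := by
    rintro ⟨q, hq, hinf⟩
    unfold Pre_convert_pointer at hpre
    rw [← Bool.not_eq_true, List.any_eq_true] at hpre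
    apply hpre
    simp only [pvPats1, List.mem_map] at hq
    obtain ⟨p, hp, rfl⟩ := hq
    exact ⟨p, hp, (PySem.Str.isIn_iff_infix p pointer).2 hinf⟩
  have hA6 : (PySem.Str.replace (PySem.Str.replace (PySem.Str.replace (PySem.Str.replace
      (PySem.Str.replace (PySem.Str.replace pointer "events" "sdfEvent") "actions" "sdfAction")
      "properties" "sdfProperty") "schemaDefinitions" "sdfData") "input" "sdfInputData")
      "output" "sdfOutputData").toList = pvScanW pvTable pointer.toList := by
    simp only [PySem.Str.toList_replace]
    rw [pvReplace_eq_pvRep "events".toList "sdfEvent".toList _ (by decide),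
        pvReplace_eq_pvRep "actions".toList "sdfAction".toList _ (by decide),
        pvReplace_eq_pvRep "properties".toList "sdfProperty".toList _ (by decide),
        pvReplace_eq_pvRep "schemaDefinitions".toList "sdfData".toList _ (by decide),
        pvReplace_eq_pvRep "input".toList "sdfInputData".toList _ (by decide),
        pvReplace_eq_pvRep "output".toList "sdfOutputData".toList _ (by decide)]
    exact pvChain pointer.toList hbad
  have hB : (String.ofList (pvScan pvTable pointer.toList.length pointer.toList)).toList
      = pvScanW pvTable pointer.toList := by
    rw [String.toList_ofList]
    exact pvScan_eq_pvScanW pvTable pointer.toList.length pointer.toList le_rfl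
  simp only [convert_pointer, convert_pointer_alt]
  exact pvSliceCongr current_path _ _ (hA6.trans hB.symm)
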